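-- pv_equiv track=rewrite | github.com/clarkycam/COMPUTER-SCIENCE | NEA/f2l_cases.py | translate_algorithm
-- ===== SOURCE A (Python) =====
-- MOVE_TRANSLATION = {
--     "red-green": {  # F-R slot (no rotation needed - this IS front-right)
--         "R": "R", "Rprime": "Rprime", "R2": "R2",
--         "L": "L", "Lprime": "Lprime", "L2": "L2",
--         "F": "F", "Fprime": "Fprime", "F2": "F2",
--         "B": "B", "Bprime": "Bprime", "B2": "B2",
--         "U": "U", "Uprime": "Uprime", "U2": "U2",
--         "D": "D", "Dprime": "Dprime", "D2": "D2"
--     },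
--     "orange-green": {  # F-L slot (rotate 90° CCW: F stays, R→F, B→R, L→B)
--         "R": "F", "Rprime": "Fprime", "R2": "F2",
--         "L": "B", "Lprime": "Bprime", "L2": "B2",
--         "F": "L", "Fprime": "Lprime", "F2": "L2",
--         "B": "R", "Bprime": "Rprime", "B2": "R2",
--         "U": "U", "Uprime": "Uprime", "U2": "U2",
--         "D": "D", "Dprime": "Dprime", "D2": "D2"
--     },
--     "red-blue": {  # B-R slot (rotate 180°: F→B, R stays, B→F, L→L)
--         "R": "B", "Rprime": "Bprime", "R2": "B2",
--         "L": "F", "Lprime": "Fprime", "L2": "F2",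
--         "F": "R", "Fprime": "Rprime", "F2": "R2",
--         "B": "L", "Bprime": "Lprime", "B2": "L2",
--         "U": "U", "Uprime": "Uprime", "U2": "U2",
--         "D": "D", "Dprime": "Dprime", "D2": "D2"
--     },
--     "orange-blue": {  # B-L slot (rotate 90° CW: F→R, R→B, B→L, L→F)
--         "R": "L", "Rprime": "Lprime", "R2": "L2",
--         "L": "R", "Lprime": "Rprime", "L2": "R2",
--         "F": "B", "Fprime": "Bprime", "F2": "B2",
--         "B": "F", "Bprime": "Fprime", "B2": "F2",
--         "U": "U", "Uprime": "Uprime", "U2": "U2",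
--         "D": "D", "Dprime": "Dprime", "D2": "D2"
--     }
-- }
--
-- def translate_algorithm(algorithm, slot_name):
--     """
--     Translate an F2L algorithm from the standard F-R slot to the target slot.
--
--     Args:
--         algorithm: List of moves in standard F-R notation
--         slot_name: Target slot ("red-green", "orange-green", "red-blue", "orange-blue")
--
--     Returns:
--         List of translated moves for the target slot
--     """
--     if slot_name not in MOVE_TRANSLATION:
--         return algorithm
--
--     translation_map = MOVE_TRANSLATION[slot_name]
--     translated = []
--
--     for move in algorithm:
--         translated.append(translation_map.get(move, move))
--
--     return translated
-- ===== SOURCE B (Python) =====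
-- SLOT_FACE_PERMUTATION = {
--     "red-green":    {"R": "R", "L": "L", "F": "F", "B": "B", "U": "U", "D": "D"},
--     "orange-green": {"R": "F", "L": "B", "F": "L", "B": "R", "U": "U", "D": "D"},
--     "red-blue":     {"R": "B", "L": "F", "F": "R", "B": "L", "U": "U", "D": "D"},
--     "orange-blue":  {"R": "L", "L": "R", "F": "B", "B": "F", "U": "U", "D": "D"},
-- }
--
-- SUFFIXES = ("", "prime", "2")
--
-- def translate_algorithm(algorithm, slot_name):
--     perm = SLOT_FACE_PERMUTATION.get(slot_name)
--     if perm is None: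
--         return algorithm
--     def translate(move):
--         base, suffix = move[:1], move[1:]
--         if base in perm and suffix in SUFFIXES:
--             return perm[base] + suffix
--         return move
--     return [translate(move) for move in algorithm]
-- ===== Notes on version B (the rewrite author's own statement) =====
-- stated objective: idiomatic
-- what changed: B replaces A's four 18-entry move-to-move dictionaries by a per-slot permutation of the six face letters plus a base/suffix split of each move (move[:1] / move[1:], suffix in ('', 'prime', '2')), so the translation is computed structurally instead of looked up whole.
import Mathlib
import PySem

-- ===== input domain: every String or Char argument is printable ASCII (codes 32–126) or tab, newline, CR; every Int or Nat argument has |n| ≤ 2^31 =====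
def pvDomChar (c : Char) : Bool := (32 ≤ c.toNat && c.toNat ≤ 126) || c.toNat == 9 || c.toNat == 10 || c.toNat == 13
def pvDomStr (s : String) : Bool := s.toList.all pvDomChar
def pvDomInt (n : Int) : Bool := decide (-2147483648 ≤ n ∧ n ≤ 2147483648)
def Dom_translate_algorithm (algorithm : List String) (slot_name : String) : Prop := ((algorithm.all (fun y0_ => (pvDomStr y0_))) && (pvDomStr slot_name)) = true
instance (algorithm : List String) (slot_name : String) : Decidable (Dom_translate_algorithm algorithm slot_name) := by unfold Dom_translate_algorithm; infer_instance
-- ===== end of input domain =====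

-- B replaces the 4×18-entry move dictionaries by a per-slot permutation of the six face
-- letters plus a base/suffix split of each move (idiomatic; same cost).

-- ===== PORT A =====
def MOVE_TRANSLATION : PySem.Dict String (PySem.Dict String String) :=
  PySem.Dict.mk [
    ("red-green", PySem.Dict.mk [
      ("R", "R"), ("Rprime", "Rprime"), ("R2", "R2"),
      ("L", "L"), ("Lprime", "Lprime"), ("L2", "L2"),
      ("F", "F"), ("Fprime", "Fprime"), ("F2", "F2"),
      ("B", "B"), ("Bprime", "Bprime"), ("B2", "B2"),
      ("U", "U"), ("Uprime", "Uprime"), ("U2", "U2"),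
      ("D", "D"), ("Dprime", "Dprime"), ("D2", "D2")]),
    ("orange-green", PySem.Dict.mk [
      ("R", "F"), ("Rprime", "Fprime"), ("R2", "F2"),
      ("L", "B"), ("Lprime", "Bprime"), ("L2", "B2"),
      ("F", "L"), ("Fprime", "Lprime"), ("F2", "L2"),
      ("B", "R"), ("Bprime", "Rprime"), ("B2", "R2"),
      ("U", "U"), ("Uprime", "Uprime"), ("U2", "U2"),
      ("D", "D"), ("Dprime", "Dprime"), ("D2", "D2")]),
    ("red-blue", PySem.Dict.mk [
      ("R", "B"), ("Rprime", "Bprime"), ("R2", "B2"),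
      ("L", "F"), ("Lprime", "Fprime"), ("L2", "F2"),
      ("F", "R"), ("Fprime", "Rprime"), ("F2", "R2"),
      ("B", "L"), ("Bprime", "Lprime"), ("B2", "L2"),
      ("U", "U"), ("Uprime", "Uprime"), ("U2", "U2"),
      ("D", "D"), ("Dprime", "Dprime"), ("D2", "D2")]),
    ("orange-blue", PySem.Dict.mk [
      ("R", "L"), ("Rprime", "Lprime"), ("R2", "L2"),
      ("L", "R"), ("Lprime", "Rprime"), ("L2", "R2"),
      ("F", "B"), ("Fprime", "Bprime"), ("F2", "B2"),
      ("B", "F"), ("Bprime", "Fprime"), ("B2", "F2"),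
      ("U", "U"), ("Uprime", "Uprime"), ("U2", "U2"),
      ("D", "D"), ("Dprime", "Dprime"), ("D2", "D2")])]

def translate_algorithm (algorithm : List String) (slot_name : String) : List String :=
  match MOVE_TRANSLATION.get? slot_name with
  | none => algorithm          -- 'if slot_name not in MOVE_TRANSLATION: return algorithm'
  | some translation_map =>    -- 'translation_map = MOVE_TRANSLATION[slot_name]'
      algorithm.foldl (fun translated move => translated ++ [translation_map.getD move move]) []

-- ===== PORT B =====
def SLOT_FACE_PERMUTATION : PySem.Dict String (PySem.Dict String String) :=
  PySem.Dict.mk [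
    ("red-green",    PySem.Dict.mk [("R", "R"), ("L", "L"), ("F", "F"), ("B", "B"), ("U", "U"), ("D", "D")]),
    ("orange-green", PySem.Dict.mk [("R", "F"), ("L", "B"), ("F", "L"), ("B", "R"), ("U", "U"), ("D", "D")]),
    ("red-blue",     PySem.Dict.mk [("R", "B"), ("L", "F"), ("F", "R"), ("B", "L"), ("U", "U"), ("D", "D")]),
    ("orange-blue",  PySem.Dict.mk [("R", "L"), ("L", "R"), ("F", "B"), ("B", "F"), ("U", "U"), ("D", "D")])]

-- 'def translate(move)': base = move[:1], suffix = move[1:]; 'suffix in SUFFIXES' with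
-- SUFFIXES = ("", "prime", "2") is the three-way list-of-chars equality below.
def pvTranslateMove (perm : PySem.Dict String String) (move : String) : String :=
  let base := String.ofList (move.toList.take 1)
  let suffix := move.toList.drop 1
  if perm.contains base = true ∧ (suffix = [] ∨ suffix = ['p','r','i','m','e'] ∨ suffix = ['2']) then
    String.ofList ((perm.getD base base).toList ++ suffix)
  else move

def translate_algorithm_alt (algorithm : List String) (slot_name : String) : List String :=
  match SLOT_FACE_PERMUTATION.get? slot_name with
  | none => algorithm
  | some perm => algorithm.map (pvTranslateMove perm)

-- ===== PRECONDITION & SPEC =====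
def Spec_translate_algorithm (algorithm : List String) (slot_name : String) (out : List String) : Prop := out = translate_algorithm_alt algorithm slot_name
instance (algorithm : List String) (slot_name : String) (out : List String) : Decidable (Spec_translate_algorithm algorithm slot_name out) := by unfold Spec_translate_algorithm; infer_instance

-- ===== CLAIM (what is proved, stated in full; the proofs are below) =====
def Claim_equal_translate_algorithm : Prop := ∀ (algorithm : List String) (slot_name : String), Dom_translate_algorithm algorithm slot_name → Spec_translate_algorithm algorithm slot_name (translate_algorithm algorithm slot_name)

-- ===== LEMMAS AND PROOFS =====

-- A's per-slot 18-key dictionary and B's 6-key face dictionary, generated from a face permutation P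
def pvGenA (P : List (Char × Char)) : List (String × String) :=
  P.flatMap (fun p =>
    [(String.ofList [p.1], String.ofList [p.2]),
     (String.ofList (p.1 :: ['p','r','i','m','e']), String.ofList (p.2 :: ['p','r','i','m','e'])),
     (String.ofList [p.1, '2'], String.ofList [p.2, '2'])])

def pvGenB (P : List (Char × Char)) : PySem.Dict String String :=
  PySem.Dict.mk (P.map (fun p => (String.ofList [p.1], String.ofList [p.2])))

lemma ofList_beq_iff (a : List Char) (s : String) : (String.ofList a == s) = decide (a = s.toList) := by
  rw [Bool.beq_eq_decide_eq]
  simp [String.ext_iff]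

lemma getD_mk_cons {k v : String} {rest : List (String × String)} (x d0 : String) :
    (PySem.Dict.mk ((k, v) :: rest)).getD x d0 = if k == x then v else (PySem.Dict.mk rest).getD x d0 := by
  rw [PySem.Dict.getD_eq_get?_getD, PySem.Dict.get?_mk_cons]
  split <;> simp [PySem.Dict.getD_eq_get?_getD]

lemma contains_mk_cons {k v : String} {rest : List (String × String)} (x : String) :
    (PySem.Dict.mk ((k, v) :: rest)).contains x = ((k == x) || (PySem.Dict.mk rest).contains x) := by
  rw [PySem.Dict.contains_eq_isSome_get?, PySem.Dict.get?_mk_cons]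
  split <;> rename_i h <;> simp [h, PySem.Dict.contains_eq_isSome_get?]

lemma skipA (p : Char × Char) (P : List (Char × Char)) (s : String)
    (h1 : (String.ofList [p.1] == s) = false)
    (h2 : (String.ofList (p.1 :: ['p','r','i','m','e']) == s) = false)
    (h3 : (String.ofList [p.1, '2'] == s) = false) :
    (PySem.Dict.mk (pvGenA (p :: P))).getD s s = (PySem.Dict.mk (pvGenA P)).getD s s := by
  simp only [pvGenA, List.flatMap_cons, List.cons_append, List.nil_append, getD_mk_cons, h1, h2, h3,
    Bool.false_eq_true, if_false]

lemma skipB (p : Char × Char) (P : List (Char × Char)) (s : String)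
    (h : (String.ofList [p.1] == String.ofList (s.toList.take 1)) = false) :
    pvTranslateMove (pvGenB (p :: P)) s = pvTranslateMove (pvGenB P) s := by
  simp only [pvTranslateMove, pvGenB, List.map_cons, contains_mk_cons, getD_mk_cons, h,
    Bool.false_or, Bool.false_eq_true, if_false]

lemma pvMove_eq (P : List (Char × Char)) (s : String) :
    (PySem.Dict.mk (pvGenA P)).getD s s = pvTranslateMove (pvGenB P) s := by
  induction P with
  | nil => simp [pvGenA, pvGenB, pvTranslateMove, PySem.Dict.getD, PySem.Dict.get?, PySem.Dict.contains]
  | cons p P ih =>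
    rcases hs : s.toList with _ | ⟨c, rest⟩
    · rw [skipA _ _ _ (by simp [ofList_beq_iff, hs]) (by simp [ofList_beq_iff, hs]) (by simp [ofList_beq_iff, hs]),
        skipB _ _ _ (by simp [ofList_beq_iff, hs]), ih]
    · by_cases hc : c = p.1
      · subst hc
        by_cases h0 : rest = []
        · subst h0
          have hse : s = String.ofList s.toList := String.ofList_toList.symm
          rw [hs] at hse
          rw [hse]
          simp [pvTranslateMove, pvGenA, pvGenB, getD_mk_cons]
        · by_cases hp : rest = ['p','r','i','m','e']
          · subst hp
            have hse : s = String.ofList s.toList := String.ofList_toList.symm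
            rw [hs] at hse
            rw [hse]
            simp [pvTranslateMove, pvGenA, pvGenB, getD_mk_cons, ofList_beq_iff]
          · by_cases h2 : rest = ['2']
            · subst h2
              have hse : s = String.ofList s.toList := String.ofList_toList.symm
              rw [hs] at hse
              rw [hse]
              simp [pvTranslateMove, pvGenA, pvGenB, getD_mk_cons, ofList_beq_iff]
            · -- recognised face, unrecognised suffix: both sides return the move unchanged
              rw [skipA _ _ _ (by simp [ofList_beq_iff, hs, Ne.symm h0])
                    (by simp [ofList_beq_iff, hs]; exact fun h => absurd h.symm hp)
                    (by simp [ofList_beq_iff, hs]; exact fun h => absurd h.symm h2), ih]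
              simp only [pvTranslateMove, hs]
              have hcond : ¬(rest = [] ∨ rest = ['p','r','i','m','e'] ∨ rest = ['2']) := by
                simp [h0, hp, h2]
              simp [hcond]
      · rw [skipA _ _ _ (by simp [ofList_beq_iff, hs, Ne.symm hc])
              (by simp [ofList_beq_iff, hs, Ne.symm hc]) (by simp [ofList_beq_iff, hs, Ne.symm hc]),
          skipB _ _ _ (by simp [ofList_beq_iff, hs, Ne.symm hc]), ih]

-- the four slots' face permutations (proof helpers)
def pvP_rg : List (Char × Char) := [('R','R'), ('L','L'), ('F','F'), ('B','B'), ('U','U'), ('D','D')]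
def pvP_og : List (Char × Char) := [('R','F'), ('L','B'), ('F','L'), ('B','R'), ('U','U'), ('D','D')]
def pvP_rb : List (Char × Char) := [('R','B'), ('L','F'), ('F','R'), ('B','L'), ('U','U'), ('D','D')]
def pvP_ob : List (Char × Char) := [('R','L'), ('L','R'), ('F','B'), ('B','F'), ('U','U'), ('D','D')]

lemma pvSlot_case (alg : List String) (P : List (Char × Char))
    (dA : PySem.Dict String String) (hA : dA = PySem.Dict.mk (pvGenA P)) :
    alg.foldl (fun translated move => translated ++ [dA.getD move move]) []
      = alg.map (pvTranslateMove (pvGenB P)) := by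
  rw [PySem.List.foldl_append_singleton_eq_map, List.nil_append, hA]
  exact List.map_congr_left (fun m _ => pvMove_eq P m)

-- ===== VERDICT (by name: the statement is the Claim_ definition above) =====
theorem translate_algorithm_spec : Claim_equal_translate_algorithm := by
  intro alg slot _
  show translate_algorithm alg slot = translate_algorithm_alt alg slot
  by_cases h1 : slot = "red-green"
  · subst h1
    simp only [translate_algorithm, translate_algorithm_alt,
      show MOVE_TRANSLATION.get? "red-green" = some (PySem.Dict.mk (pvGenA pvP_rg)) from by decide,
      show SLOT_FACE_PERMUTATION.get? "red-green" = some (pvGenB pvP_rg) from by decide]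
    exact pvSlot_case alg pvP_rg _ rfl
  by_cases h2 : slot = "orange-green"
  · subst h2
    simp only [translate_algorithm, translate_algorithm_alt,
      show MOVE_TRANSLATION.get? "orange-green" = some (PySem.Dict.mk (pvGenA pvP_og)) from by decide,
      show SLOT_FACE_PERMUTATION.get? "orange-green" = some (pvGenB pvP_og) from by decide]
    exact pvSlot_case alg pvP_og _ rfl
  by_cases h3 : slot = "red-blue"
  · subst h3
    simp only [translate_algorithm, translate_algorithm_alt,
      show MOVE_TRANSLATION.get? "red-blue" = some (PySem.Dict.mk (pvGenA pvP_rb)) from by decide,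
      show SLOT_FACE_PERMUTATION.get? "red-blue" = some (pvGenB pvP_rb) from by decide]
    exact pvSlot_case alg pvP_rb _ rfl
  by_cases h4 : slot = "orange-blue"
  · subst h4
    simp only [translate_algorithm, translate_algorithm_alt,
      show MOVE_TRANSLATION.get? "orange-blue" = some (PySem.Dict.mk (pvGenA pvP_ob)) from by decide,
      show SLOT_FACE_PERMUTATION.get? "orange-blue" = some (pvGenB pvP_ob) from by decide]
    exact pvSlot_case alg pvP_ob _ rfl
  · have e1 : ("red-green" == slot) = false := beq_eq_false_iff_ne.mpr (Ne.symm h1)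
    have e2 : ("orange-green" == slot) = false := beq_eq_false_iff_ne.mpr (Ne.symm h2)
    have e3 : ("red-blue" == slot) = false := beq_eq_false_iff_ne.mpr (Ne.symm h3)
    have e4 : ("orange-blue" == slot) = false := beq_eq_false_iff_ne.mpr (Ne.symm h4)
    simp [translate_algorithm, translate_algorithm_alt, MOVE_TRANSLATION,
      SLOT_FACE_PERMUTATION, PySem.Dict.get?, List.find?, e1, e2, e3, e4]
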